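-- pv_equiv track=rewrite | github.com/prowe12/antarctic_inversions | combine_years.py | get_regex_from_fileformat
-- ===== SOURCE A (Python) =====
-- def get_regex_from_fileformat(fmt: str) -> str:
--     """
--     Get string to use with regex from the file format string
--     @params fileformat  The file format
--     @returns  The string for regex
--     """
--     # Create the regex from the fileformat
--     regstr = ""
--     skipnext = False
--     for char in fmt:
--         if skipnext:
--             skipnext = False
--             continue
--         if char == "%":
--             regstr += ".+"
--             skipnext = True
--         else:
--             regstr += char
--     return regstr
-- ===== SOURCE B (Python) =====
-- import re
--
-- def get_regex_from_fileformat(fmt: str) -> str: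
--     """
--     Get string to use with regex from the file format string
--     @params fileformat  The file format
--     @returns  The string for regex
--     """
--     return re.sub(r"%.?", ".+", fmt, flags=re.DOTALL)
-- ===== Notes on version B (the rewrite author's own statement) =====
-- stated objective: idiomatic
-- what changed: The manual character loop with a skipnext flag is replaced by a single C-speed re.sub substitution of every percent sign plus optional following character by dot-plus (with DOTALL so a skipped newline is consumed too).
import Mathlib
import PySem

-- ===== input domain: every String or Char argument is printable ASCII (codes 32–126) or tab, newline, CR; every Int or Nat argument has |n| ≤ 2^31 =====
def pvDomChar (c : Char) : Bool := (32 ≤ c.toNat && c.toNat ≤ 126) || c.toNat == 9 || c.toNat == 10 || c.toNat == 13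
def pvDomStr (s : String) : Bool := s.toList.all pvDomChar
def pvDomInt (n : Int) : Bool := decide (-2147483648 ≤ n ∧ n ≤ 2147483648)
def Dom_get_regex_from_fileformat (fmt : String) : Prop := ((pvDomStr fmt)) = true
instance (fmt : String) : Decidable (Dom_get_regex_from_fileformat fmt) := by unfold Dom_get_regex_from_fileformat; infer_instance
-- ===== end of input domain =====

-- B replaces A's char loop with skip-flag by a single regex substitution re.sub(r"%.?", ".+", fmt, re.DOTALL) (objective: idiomatic).

-- ===== PORT A =====
-- A's for-loop over fmt with accumulator regstr (as List Char) and the skipnext flag.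
def pvGoA : List Char → List Char → Bool → List Char
  | [], acc, _ => acc
  | c :: rest, acc, skipnext =>
    if skipnext then pvGoA rest acc false
    else if c = '%' then pvGoA rest (acc ++ ['.', '+']) true
    else pvGoA rest (acc ++ [c]) false

def get_regex_from_fileformat (fmt : String) : String :=
  String.ofList (pvGoA fmt.toList [] false)

-- ===== PORT B =====
-- re.sub(r"%.?", ".+", fmt, re.DOTALL): left-to-right scan; at '%' emit ".+" and
-- drop the optional following character (any char, DOTALL); others pass through.
def pvSubPct : List Char → List Char
  | [] => []
  | c :: rest =>
    if c = '%' then '.' :: '+' :: pvSubPct rest.tail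
    else c :: pvSubPct rest
decreasing_by
  · simp [List.tail]; cases rest <;> simp <;> omega
  · simp

def get_regex_from_fileformat_alt (fmt : String) : String :=
  String.ofList (pvSubPct fmt.toList)

-- ===== PRECONDITION & SPEC =====
def Spec_get_regex_from_fileformat (fmt : String) (out : String) : Prop := out = get_regex_from_fileformat_alt fmt
instance (fmt : String) (out : String) : Decidable (Spec_get_regex_from_fileformat fmt out) := by unfold Spec_get_regex_from_fileformat; infer_instance

-- ===== CLAIM (what is proved, stated in full; the proofs are below) =====
def Claim_equal_get_regex_from_fileformat : Prop := ∀ (fmt : String), Dom_get_regex_from_fileformat fmt → Spec_get_regex_from_fileformat fmt (get_regex_from_fileformat fmt)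

-- ===== LEMMAS AND PROOFS =====
theorem pvGoA_eq (l : List Char) : ∀ acc, pvGoA l acc false = acc ++ pvSubPct l := by
  induction l using pvSubPct.induct with
  | case1 => intro acc; simp [pvGoA, pvSubPct]
  | case2 rest ih =>
    intro acc
    rw [pvSubPct, if_pos rfl, pvGoA]
    simp only [Bool.false_eq_true, if_false]
    cases rest with
    | nil => simp [pvGoA, pvSubPct]
    | cons d t =>
      rw [pvGoA]
      simp only [List.tail_cons] at *
      rw [ih]
      simp
  | case3 c rest hc ih =>
    intro acc
    rw [pvSubPct, if_neg hc, pvGoA]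
    simp only [Bool.false_eq_true, if_false, if_neg hc]
    rw [ih (acc ++ [c])]
    simp

-- ===== VERDICT (by name: the statement is the Claim_ definition above) =====
theorem get_regex_from_fileformat_spec : Claim_equal_get_regex_from_fileformat := by
  intro fmt _
  unfold Spec_get_regex_from_fileformat get_regex_from_fileformat get_regex_from_fileformat_alt
  rw [pvGoA_eq]
  simp
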